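-- pv_equiv track=rewrite | github.com/kai3n/Daily-commit-project | Sanghyun/week48/방금그곡.py | solution
-- ===== SOURCE A (Python) =====
-- def solution(m, musicinfos):
--     # 높은 음은 소문자로 전환
--     def change(music):
--         if 'A#' in music:
--             music = music.replace('A#', 'a')
--         if 'F#' in music:
--             music = music.replace('F#', 'f')
--         if 'C#' in music:
--             music = music.replace('C#', 'c')
--         if 'G#' in music:
--             music = music.replace('G#', 'g')
--         if 'D#' in music:
--             music = music.replace('D#', 'd')
--         return music
--
--     check = []
--     for i, musicinfo in enumerate(musicinfos):
--         # 재생시간에 총 악보 저장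
--         ackbo = ''
--         # 곡에 대한 정보 ,기준으로 리스트
--         list_musicinfo = musicinfo.split(',')
--         # 재생 시작시간
--         start_minute = int(list_musicinfo[0][0:2]) * 60 + int(list_musicinfo[0][3:5])
--         # 재생 종료시간
--         end_minute = int(list_musicinfo[1][0:2]) * 60 + int(list_musicinfo[1][3:5])
--         # 총 플레이 시간
--         play_minute = end_minute - start_minute
--         # 높은음은 전부 소문자로 바꿔 한개음으로 분류
--         change_ackbo = change(list_musicinfo[3])
--
--         for j in range(play_minute):
--             # ackbo에 재생시간 만큼 계속 음들 저장
--             ackbo += change_ackbo[j%len(change_ackbo)]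
--         # 내가 들은 곡 높음은을 소문자로 바꿔 한개음으로 변경
--         changd_m = change(m)
--         # 재생길이, 곡이름, 먼저 듣는 순서대로 리스트에 저장
--         if changd_m in ackbo:
--             check.append((play_minute,list_musicinfo[2],i))
--     # 재생시간이 길수록, 재생시간이 같으면 먼저 들은순서대로 정렬
--     check.sort(key = lambda x :(-x[0],x[2]))
--     # check에 있으면 곡이름 반환
--     if check:
--         return check[0][1]
--     # 곡이 없으므로 None반환
--     return '(None)'
-- ===== SOURCE B (Python) =====
-- def solution(m, musicinfos):
--     # normalize sharp notes to single lowercase letters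
--     def change(music):
--         if 'A#' in music:
--             music = music.replace('A#', 'a')
--         if 'F#' in music:
--             music = music.replace('F#', 'f')
--         if 'C#' in music:
--             music = music.replace('C#', 'c')
--         if 'G#' in music:
--             music = music.replace('G#', 'g')
--         if 'D#' in music:
--             music = music.replace('D#', 'd')
--         return music
--
--     def minutes(s):
--         return int(s[0:2]) * 60 + int(s[3:5])
--
--     def entry(heard, info):
--         # one record -> (play_time, title) if the heard fragment occurs, else None
--         parts = info.split(',')
--         play = minutes(parts[1]) - minutes(parts[0])
--         tune = change(parts[3])
--         melody = (tune * (play // len(tune) + 1))[:play] if play > 0 else ''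
--         return (play, parts[2]) if heard in melody else None
--
--     heard = change(m)
--     best = None
--     for cand in (entry(heard, info) for info in musicinfos):
--         if cand is not None and (best is None or cand[0] > best[0]):
--             best = cand
--     return '(None)' if best is None else best[1]
-- ===== Notes on version B (the rewrite author's own statement) =====
-- stated objective: simpler
-- what changed: B replaces A's collect-all-candidates list plus final sort by a per-record candidate function (parse via a minutes helper, build the melody by string repetition and truncation instead of A's character loop, return an optional (play,title)) mapped over the records and reduced by a running-max fold with strict >, which keeps the earliest longest match exactly like A's sort key (-play,index).
import Mathlib
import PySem

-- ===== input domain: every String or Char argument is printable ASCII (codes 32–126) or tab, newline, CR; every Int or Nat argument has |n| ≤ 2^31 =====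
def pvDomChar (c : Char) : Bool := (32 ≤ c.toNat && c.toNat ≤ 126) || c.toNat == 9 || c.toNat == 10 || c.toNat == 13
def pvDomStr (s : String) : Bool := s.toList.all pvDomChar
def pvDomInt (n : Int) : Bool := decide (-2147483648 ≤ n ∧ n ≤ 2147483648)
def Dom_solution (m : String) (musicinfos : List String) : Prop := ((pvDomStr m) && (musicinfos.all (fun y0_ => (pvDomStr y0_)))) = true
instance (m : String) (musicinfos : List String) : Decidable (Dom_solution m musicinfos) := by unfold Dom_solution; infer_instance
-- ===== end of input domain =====

-- B replaces A's collect-all-matches list and final sort by a per-record candidate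
-- function (a minutes helper, melody built by repetition and truncation instead of A's
-- character loop) mapped over the records and reduced by a running-max fold (objective: simpler).

-- shared helper: the Python inner function `change` (identical in Source A and Source B)
def change (music : String) : String :=
  let music := if PySem.Str.isIn "A#" music then PySem.Str.replace music "A#" "a" else music
  let music := if PySem.Str.isIn "F#" music then PySem.Str.replace music "F#" "f" else music
  let music := if PySem.Str.isIn "C#" music then PySem.Str.replace music "C#" "c" else music
  let music := if PySem.Str.isIn "G#" music then PySem.Str.replace music "G#" "g" else music
  let music := if PySem.Str.isIn "D#" music then PySem.Str.replace music "D#" "d" else music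
  music

-- musicinfo.split(','): the separator is the non-empty literal ',', so split? is always `some`
def pySplitComma (s : String) : List String := (PySem.Str.split? s ",").getD []

-- ===== PORT A =====
-- body of A's inner loop `ackbo += change_ackbo[j % len(change_ackbo)]`; `none` = a raised exception
def ackStep (t : String) (a : Option (List Char)) (j : Int) : Option (List Char) :=
  match a with
  | none => none
  | some cs =>
    match PySem.Int.divmod? j (PySem.Str.len t) with
    | none => none
    | some qr =>
      match PySem.Str.pyGet? t qr.2 with
      | none => none
      | some c => some (cs ++ [c])

-- one iteration of A's `for i, musicinfo in enumerate(musicinfos)` loop; `none` = a raised exception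
def solutionStepA (m : String) (acc : Option (List (Int × String × Int))) (p : Int × String) :
    Option (List (Int × String × Int)) :=
  match acc with
  | none => none
  | some check =>
    let parts := pySplitComma p.2
    match PySem.List.pyGet? parts 0 with
    | none => none
    | some p0 =>
      match PySem.Int.ofStr? (PySem.Str.slice p0 (some 0) (some 2)),
            PySem.Int.ofStr? (PySem.Str.slice p0 (some 3) (some 5)) with
      | none, _ => none
      | _, none => none
      | some h0, some n0 =>
        let startMinute := h0 * 60 + n0
        match PySem.List.pyGet? parts 1 with
        | none => none
        | some p1 =>
          match PySem.Int.ofStr? (PySem.Str.slice p1 (some 0) (some 2)),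
                PySem.Int.ofStr? (PySem.Str.slice p1 (some 3) (some 5)) with
          | none, _ => none
          | _, none => none
          | some h1, some n1 =>
            let endMinute := h1 * 60 + n1
            let playMinute := endMinute - startMinute
            match PySem.List.pyGet? parts 3 with
            | none => none
            | some p3 =>
              let changeAckbo := change p3
              -- `for j in range(play_minute): ackbo += change_ackbo[j % len(change_ackbo)]`
              let ackbo := (PySem.List.pyRange 0 playMinute 1).foldl (ackStep changeAckbo) (some [])
              match ackbo with
              | none => none
              | some cs =>
                let changdM := change m
                if PySem.Str.isIn changdM (String.ofList cs) then
                  match PySem.List.pyGet? parts 2 with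
                  | none => none
                  | some name => some (check ++ [(playMinute, name, p.1)])
                else some check

def solution (m : String) (musicinfos : List String) : String :=
  match (PySem.List.enumerate musicinfos).foldl (solutionStepA m) (some []) with
  | none => ""   -- exception path; excluded by Pre_solution
  | some check =>
    -- check.sort(key = lambda x: (-x[0], x[2])); return check[0][1] if check else '(None)'
    match PySem.List.sorted2 check (fun x => -x.1) (fun x => x.2.2) with
    | [] => "(None)"
    | x :: _ => x.2.1

-- ===== PORT B =====
-- B's helper `minutes(s) = int(s[0:2])*60 + int(s[3:5])`; `none` = a raised exception
def minutesB? (s : String) : Option Int :=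
  match PySem.Int.ofStr? (PySem.Str.slice s (some 0) (some 2)),
        PySem.Int.ofStr? (PySem.Str.slice s (some 3) (some 5)) with
  | some h, some n => some (h * 60 + n)
  | _, _ => none

-- B's `melody = (tune * (play // len(tune) + 1))[:play] if play > 0 else ''`; `none` = a raised exception
def melodyB (t : String) (play : Int) : Option (List Char) :=
  if 0 < play then
    match PySem.Int.divmod? play (PySem.Str.len t) with
    | none => none
    | some qr =>
      some (PySem.List.slice (PySem.List.pyRepeat t.toList (qr.1 + 1)) none (some play))
  else some []

-- B's `entry(heard, info)`: one record to an optional (play, title) candidate;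
-- outer `none` = a raised exception, inner option = the Python None / tuple
def entryB (heard info : String) : Option (Option (Int × String)) :=
  let parts := pySplitComma info
  match PySem.List.pyGet? parts 1, PySem.List.pyGet? parts 0 with
  | some p1, some p0 =>
    match minutesB? p1, minutesB? p0 with
    | some e, some s =>
      let play := e - s
      match PySem.List.pyGet? parts 3 with
      | some p3 =>
        match melodyB (change p3) play with
        | some melody =>
          if PySem.Chars.isIn heard.toList melody then
            match PySem.List.pyGet? parts 2 with
            | some name => some (some (play, name))
            | none => none
          else some none
        | none => none
      | none => none
    | _, _ => none
  | _, _ => none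

-- B's running-max accumulation: `if cand is not None and (best is None or cand[0] > best[0])`
def bestStep (acc cand : Option (Option (Int × String))) : Option (Option (Int × String)) :=
  match acc, cand with
  | none, _ => none
  | _, none => none
  | some best, some c =>
    match c, best with
    | none, _ => some best
    | some cv, none => some (some cv)
    | some cv, some b => if b.1 < cv.1 then some (some cv) else some (some b)

def solution_alt (m : String) (musicinfos : List String) : String :=
  let heard := change m
  match (musicinfos.map (entryB heard)).foldl bestStep (some none) with
  | none => ""   -- exception path; excluded by Pre_solution
  | some none => "(None)"
  | some (some b) => b.2

-- ===== PRECONDITION & SPEC =====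
-- helpers naming the fields of one record (used by Pre_ and the proofs)
def minutesOf (s : String) : Int :=
  ((PySem.Int.ofStr? (PySem.Str.slice s (some 0) (some 2))).getD 0) * 60 +
  ((PySem.Int.ofStr? (PySem.Str.slice s (some 3) (some 5))).getD 0)

def playOf (info : String) : Int :=
  minutesOf ((pySplitComma info).getD 1 "") - minutesOf ((pySplitComma info).getD 0 "")

def tuneOf (info : String) : String := change ((pySplitComma info).getD 3 "")

-- one record is well-formed: four comma fields, the two times parse as hh:mm ints, and the
-- melody is non-empty whenever the play time is positive (otherwise Python raises)
def recOK (info : String) : Bool :=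
  let parts := pySplitComma info
  decide (4 ≤ parts.length) &&
  (PySem.Int.ofStr? (PySem.Str.slice (parts.getD 0 "") (some 0) (some 2))).isSome &&
  (PySem.Int.ofStr? (PySem.Str.slice (parts.getD 0 "") (some 3) (some 5))).isSome &&
  (PySem.Int.ofStr? (PySem.Str.slice (parts.getD 1 "") (some 0) (some 2))).isSome &&
  (PySem.Int.ofStr? (PySem.Str.slice (parts.getD 1 "") (some 3) (some 5))).isSome &&
  (decide (playOf info ≤ 0) || decide ((tuneOf info).toList ≠ []))

-- Pre_ is exactly the set of inputs on which the Python A returns normally: every record must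
-- be well-formed in the sense of recOK (otherwise A raises IndexError/ValueError/ZeroDivisionError)
def Pre_solution (m : String) (musicinfos : List String) : Prop :=
  ∀ info ∈ musicinfos, recOK info = true

instance (m : String) (musicinfos : List String) : Decidable (Pre_solution m musicinfos) := by
  unfold Pre_solution; infer_instance

def pvWitness_solution : String × List String :=
  ("ABC", ["12:00,12:14,HELLO,CDEFGAB", "13:00,13:05,WORLD,ABCDEF"])

def Spec_solution (m : String) (musicinfos : List String) (out : String) : Prop :=
  out = solution_alt m musicinfos
instance (m : String) (musicinfos : List String) (out : String) : Decidable (Spec_solution m musicinfos out) := by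
  unfold Spec_solution; infer_instance

-- ===== CLAIM (what is proved, stated in full; the proofs are below) =====
def Claim_equal_solution : Prop := ∀ (m : String) (musicinfos : List String), Dom_solution m musicinfos → Pre_solution m musicinfos → Spec_solution m musicinfos (solution m musicinfos)

-- ===== LEMMAS AND PROOFS =====
set_option maxHeartbeats 1000000

-- proof-side names for the remaining fields of a record
def nameOf (info : String) : String := (pySplitComma info).getD 2 ""

def melodyOf (info : String) : List Char :=
  if 0 < playOf info then
    ((List.replicate ((playOf info).fdiv (((tuneOf info).toList.length : Nat) : Int) + 1).toNat
        (tuneOf info).toList).flatten).take (playOf info).toNat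
  else []

def matchesOf (m info : String) : Bool := PySem.Chars.isIn (change m).toList (melodyOf info)

-- Python's `j % len` on a non-negative j and positive length
theorem fmod_nonneg_toNat (k : Nat) (L : Nat) (hL : 0 < L) :
    ((k : Int).fmod (L : Int)) = ((k % L : Nat) : Int) := by
  rw [Int.fmod_eq_emod_of_nonneg _ (by positivity)]
  omega

theorem pyRange_zero_one (p : Int) :
    PySem.List.pyRange 0 p 1 = (List.range p.toNat).map (fun (k : Nat) => (k : Int)) := by
  simp only [PySem.List.pyRange]
  split_ifs with h0 h1 h2
  · omega
  · have he : ((p - 0 + 1 - 1) / 1) = p := by omega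
    rw [he]
    apply List.map_congr_left
    intro k _
    omega
  · have he : p.toNat = 0 := by omega
    simp [he]
  · omega
  · omega

-- the i-th character of tune*n is tune[i % len(tune)]
theorem flatten_replicate_getElem? {t : List Char} : ∀ (n i : Nat), i < n * t.length →
    ((List.replicate n t).flatten)[i]? = t[i % t.length]? := by
  intro n
  induction n with
  | zero => intro i hi; rw [Nat.zero_mul] at hi; omega
  | succ k ih =>
    intro i hi
    by_cases hlt : i < t.length
    · rw [List.replicate_succ, List.flatten_cons, List.getElem?_append_left hlt,
        Nat.mod_eq_of_lt hlt]
    · obtain ⟨j, rfl⟩ : ∃ j, i = t.length + j :=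
        ⟨i - t.length, (Nat.add_sub_cancel' (Nat.le_of_not_lt hlt)).symm⟩
      rw [List.replicate_succ, List.flatten_cons,
        List.getElem?_append_right (Nat.le_add_right _ _)]
      have he : t.length + j - t.length = j := by omega
      have hj : j < k * t.length := by
        have hsm := Nat.succ_mul k t.length
        have h2 : t.length + j < (k + 1) * t.length := hi
        linarith
      rw [he, ih j hj, Nat.add_mod_left]

-- xs[k] for a Nat index known to be in range, as a getD
theorem pyGet?_getD (xs : List String) (k : Nat) (hk : k < xs.length) :
    PySem.List.pyGet? xs (k : Int) = some (xs.getD k "") := by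
  rw [PySem.List.pyGet?_natCast, List.getElem?_eq_getElem hk, List.getD_eq_getElem _ _ hk]

-- A's character loop over range(n), characterised as a map
theorem ackbo_fold_aux (t : String) (hL : 0 < t.toList.length) (n : Nat) :
    ((List.range n).map (fun (k : Nat) => (k : Int))).foldl (ackStep t) (some []) =
      some ((List.range n).map (fun k => t.toList.getD (k % t.toList.length) 'A')) := by
  induction n with
  | zero => simp
  | succ k ih =>
    rw [List.range_succ, List.map_append, List.foldl_append, ih]
    have hdm : PySem.Int.divmod? (k : Int) (PySem.Str.len t) =
        some ((k : Int).fdiv (t.toList.length : Int), ((k % t.toList.length : Nat) : Int)) := by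
      rw [PySem.Str.len_eq]
      simp only [PySem.Int.divmod?]
      rw [if_neg (by exact_mod_cast hL.ne'), fmod_nonneg_toNat k _ hL]
    have hget : PySem.Str.pyGet? t ((k % t.toList.length : Nat) : Int) =
        some (t.toList.getD (k % t.toList.length) 'A') := by
      rw [PySem.Str.pyGet?_natCast, List.getElem?_eq_getElem (Nat.mod_lt k hL),
        List.getD_eq_getElem _ _ (Nat.mod_lt k hL)]
    simp only [List.map_cons, List.map_nil, List.foldl_cons, List.foldl_nil, ackStep, hdm, hget]
    simp

-- A's character loop builds exactly B's repeated-and-truncated melody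
theorem ackbo_eq_melody (t : String) (p : Int) (hp : 0 < p) (hL : 0 < t.toList.length) :
    (PySem.List.pyRange 0 p 1).foldl (ackStep t) (some []) =
    some (((List.replicate (p.fdiv (t.toList.length : Int) + 1).toNat t.toList).flatten).take p.toNat) := by
  have hLZ : (0 : Int) < (t.toList.length : Int) := by exact_mod_cast hL
  have hfd : p.fdiv (t.toList.length : Int) = p / (t.toList.length : Int) :=
    Int.fdiv_eq_ediv_of_nonneg _ (by positivity)
  have hdiv0 : 0 ≤ p / (t.toList.length : Int) := Int.ediv_nonneg hp.le (by positivity)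
  have h1 : (p : Int) < ((p / (t.toList.length : Int)) + 1) * (t.toList.length : Int) := by
    have hm := Int.emod_lt_of_pos p hLZ
    have he := Int.ediv_add_emod p (t.toList.length : Int)
    nlinarith
  have h2 : ((p.fdiv (t.toList.length : Int) + 1).toNat : Int) = p / (t.toList.length : Int) + 1 := by
    rw [hfd]; exact Int.toNat_of_nonneg (by omega)
  have h3 : (p.toNat : Int) ≤ ((p.fdiv (t.toList.length : Int) + 1).toNat : Int) * (t.toList.length : Int) := by
    rw [h2, Int.toNat_of_nonneg hp.le]; linarith
  have hn : p.toNat ≤ (p.fdiv (t.toList.length : Int) + 1).toNat * t.toList.length := by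
    exact_mod_cast h3
  rw [pyRange_zero_one, ackbo_fold_aux t hL p.toNat]
  congr 1
  apply List.ext_getElem?
  intro i
  rw [List.getElem?_map, List.getElem?_take]
  by_cases hi : i < p.toNat
  · rw [List.getElem?_range hi, if_pos hi,
      flatten_replicate_getElem? _ i (lt_of_lt_of_le hi hn)]
    simp only [Option.map_some]
    rw [List.getElem?_eq_getElem (Nat.mod_lt i hL), List.getD_eq_getElem _ _ (Nat.mod_lt i hL)]
  · rw [List.getElem?_eq_none (by simpa using Nat.le_of_not_lt hi), if_neg hi]
    simp

-- B's melody helper equals the proof-side melodyOf on a well-formed record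
theorem melodyB_eq (info : String)
    (hlast : playOf info ≤ 0 ∨ (tuneOf info).toList ≠ []) :
    melodyB (tuneOf info) (playOf info) = some (melodyOf info) := by
  by_cases hp : 0 < playOf info
  · have htune : 0 < (tuneOf info).toList.length := by
      rcases hlast with hle | hne
      · omega
      · have := List.length_eq_zero_iff.not.mpr hne
        omega
    have hdm : PySem.Int.divmod? (playOf info) (PySem.Str.len (tuneOf info)) =
        some ((playOf info).fdiv ((tuneOf info).toList.length : Int),
              (playOf info).fmod ((tuneOf info).toList.length : Int)) := by
      rw [PySem.Str.len_eq]
      simp only [PySem.Int.divmod?]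
      rw [if_neg (by exact_mod_cast htune.ne')]
    simp only [melodyB]
    rw [if_pos hp]
    simp only [hdm]
    rw [PySem.List.slice_to _ hp.le]
    unfold melodyOf PySem.List.pyRepeat
    rw [if_pos hp]
  · simp only [melodyB]
    rw [if_neg hp]
    unfold melodyOf
    rw [if_neg hp]

-- evaluating one iteration of A's loop on a well-formed record
theorem stepA_eq (m info : String) (i : Int) (check : List (Int × String × Int))
    (h : recOK info = true) :
    solutionStepA m (some check) (i, info) =
      some (check ++ (if matchesOf m info then [(playOf info, nameOf info, i)] else [])) := by
  simp only [recOK, Bool.and_eq_true, Bool.or_eq_true, decide_eq_true_eq,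
    Option.isSome_iff_exists] at h
  obtain ⟨⟨⟨⟨⟨hlen, a0, ha0⟩, a1, ha1⟩, b0, hb0⟩, b1, hb1⟩, hlast⟩ := h
  have g0 := pyGet?_getD (pySplitComma info) 0 (by omega)
  have g1 := pyGet?_getD (pySplitComma info) 1 (by omega)
  have g2 := pyGet?_getD (pySplitComma info) 2 (by omega)
  have g3 := pyGet?_getD (pySplitComma info) 3 (by omega)
  simp only [Nat.cast_zero, Nat.cast_one, Nat.cast_ofNat] at g0 g1 g2 g3
  have hplay : (b0 * 60 + b1) - (a0 * 60 + a1) = playOf info := by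
    simp only [playOf, minutesOf, ha0, ha1, hb0, hb1, Option.getD_some]
  have htdef : change ((pySplitComma info).getD 3 "") = tuneOf info := rfl
  simp only [solutionStepA, g0, g1, g3, ha0, ha1, hb0, hb1, htdef, hplay]
  have hmel : ((PySem.List.pyRange 0 (playOf info) 1).foldl (ackStep (tuneOf info)) (some [])) =
      some (melodyOf info) := by
    by_cases hp : 0 < playOf info
    · have htune : 0 < (tuneOf info).toList.length := by
        rcases hlast with hle | hne
        · omega
        · have := List.length_eq_zero_iff.not.mpr hne
          omega
      rw [ackbo_eq_melody (tuneOf info) (playOf info) hp htune]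
      unfold melodyOf
      rw [if_pos hp]
    · have hz : (playOf info).toNat = 0 := by omega
      rw [pyRange_zero_one, hz]
      unfold melodyOf
      rw [if_neg hp]
      rfl
  simp only [hmel]
  have hin : PySem.Str.isIn (change m) (String.ofList (melodyOf info)) = matchesOf m info := by
    rw [PySem.Str.isIn_eq]
    have hof : (String.ofList (melodyOf info)).toList = melodyOf info := by
      simp
    rw [hof, matchesOf]
  simp only [hin]
  by_cases hm : matchesOf m info = true
  · rw [if_pos hm, if_pos hm, g2]
    rfl
  · rw [if_neg hm, if_neg hm, List.append_nil]

-- evaluating B's entry on a well-formed record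
theorem entryB_eq (m info : String) (h : recOK info = true) :
    entryB (change m) info =
      some (if matchesOf m info then some (playOf info, nameOf info) else none) := by
  simp only [recOK, Bool.and_eq_true, Bool.or_eq_true, decide_eq_true_eq,
    Option.isSome_iff_exists] at h
  obtain ⟨⟨⟨⟨⟨hlen, a0, ha0⟩, a1, ha1⟩, b0, hb0⟩, b1, hb1⟩, hlast⟩ := h
  have g0 := pyGet?_getD (pySplitComma info) 0 (by omega)
  have g1 := pyGet?_getD (pySplitComma info) 1 (by omega)
  have g2 := pyGet?_getD (pySplitComma info) 2 (by omega)
  have g3 := pyGet?_getD (pySplitComma info) 3 (by omega)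
  simp only [Nat.cast_zero, Nat.cast_one, Nat.cast_ofNat] at g0 g1 g2 g3
  have hm1 : minutesB? ((pySplitComma info).getD 1 "") = some (b0 * 60 + b1) := by
    simp only [minutesB?, hb0, hb1]
  have hm0 : minutesB? ((pySplitComma info).getD 0 "") = some (a0 * 60 + a1) := by
    simp only [minutesB?, ha0, ha1]
  have hplay : (b0 * 60 + b1) - (a0 * 60 + a1) = playOf info := by
    simp only [playOf, minutesOf, ha0, ha1, hb0, hb1, Option.getD_some]
  have htdef : change ((pySplitComma info).getD 3 "") = tuneOf info := rfl
  simp only [entryB, g0, g1, g3, hm0, hm1, htdef, hplay, melodyB_eq info hlast]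
  by_cases hm : matchesOf m info = true
  · have hm' : PySem.Chars.isIn (change m).toList (melodyOf info) = true := hm
    rw [if_pos hm', g2, if_pos hm]
    rfl
  · have hm0' : matchesOf m info = false := by
      cases hmb : matchesOf m info
      · rfl
      · exact absurd hmb hm
    have hm' : PySem.Chars.isIn (change m).toList (melodyOf info) = false := hm0'
    rw [if_neg (by rw [hm']; exact Bool.false_ne_true), if_neg hm]

-- B's acceptance test on the running best
def beats (best : Option (Int × String)) (play : Int) : Bool :=
  match best with
  | none => true
  | some b => decide (b.1 < play)

theorem beats_some (b : Int × String) (play : Int) :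
    beats (some b) play = decide (b.1 < play) := rfl

-- combined effect of one record on B's running best
theorem stepB_eq (m info : String) (best : Option (Int × String))
    (h : recOK info = true) :
    bestStep (some best) (entryB (change m) info) =
      some (if matchesOf m info && beats best (playOf info) then
              some (playOf info, nameOf info)
            else best) := by
  rw [entryB_eq m info h]
  by_cases hm : matchesOf m info = true
  · rw [if_pos hm]
    cases best with
    | none =>
      have hc : (matchesOf m info && beats none (playOf info)) = true := by
        simp [beats, hm]
      rw [if_pos hc]
      rfl
    | some b =>
      by_cases hb : b.1 < playOf info
      · have hc : (matchesOf m info && beats (some b) (playOf info)) = true := by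
          simp [beats, hm, hb]
        rw [if_pos hc]
        simp only [bestStep]
        rw [if_pos hb]
      · have hc : ¬ ((matchesOf m info && beats (some b) (playOf info)) = true) := by
          rw [beats_some, decide_eq_false hb, Bool.and_false]
          exact Bool.false_ne_true
        rw [if_neg hc]
        simp only [bestStep]
        rw [if_neg hb]
  · have hm0 : matchesOf m info = false := by
      cases hmb : matchesOf m info
      · rfl
      · exact absurd hmb hm
    rw [if_neg hm]
    have hc : ¬ ((matchesOf m info && beats best (playOf info)) = true) := by
      rw [hm0, Bool.false_and]
      exact Bool.false_ne_true
    rw [if_neg hc]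
    rfl

-- the relation carried through the induction: the head of A's sorted candidate list
-- has the same play time and title as B's running best
def rel (s : List (Int × String × Int)) (best : Option (Int × String)) : Prop :=
  match s, best with
  | [], none => True
  | x :: _, some b => x.1 = b.1 ∧ x.2.1 = b.2
  | _, _ => False

theorem sorted2_snoc (l : List (Int × String × Int)) (x : Int × String × Int) :
    PySem.List.sorted2 (l ++ [x]) (fun y => -y.1) (fun y => y.2.2) =
      PySem.List.insertBy
        (fun a b => decide ((-a.1) < (-b.1)) || (!decide ((-b.1) < (-a.1)) && decide (a.2.2 < b.2.2)))
        x (PySem.List.sorted2 l (fun y => -y.1) (fun y => y.2.2)) := by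
  simp [PySem.List.sorted2, List.foldl_append]

theorem insertBy_nil {α : Type} (before : α → α → Bool) (x : α) :
    PySem.List.insertBy before x [] = [x] := rfl

theorem insertBy_cons {α : Type} (before : α → α → Bool) (x y : α) (ys : List α) :
    PySem.List.insertBy before x (y :: ys) =
      if before x y then x :: y :: ys else y :: PySem.List.insertBy before x ys := rfl


-- the insertion comparator applied to the new candidate and the old head, computed
theorem cmp_key (play i0 : Int) (nm : String) (y : Int × String × Int) (c : Int)
    (hyi : y.2.2 < i0) (hy1 : y.1 = c) :
    (decide ((-((play, nm, i0) : Int × String × Int).1) < (-y.1)) ||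
      (!decide ((-y.1) < (-((play, nm, i0) : Int × String × Int).1)) &&
        decide (((play, nm, i0) : Int × String × Int).2.2 < y.2.2))) = decide (c < play) := by
  subst hy1
  show (decide ((-play) < (-y.1)) || (!decide ((-y.1) < (-play)) && decide (i0 < y.2.2))) = decide (y.1 < play)
  have h1 : decide (i0 < y.2.2) = false := decide_eq_false (by omega)
  rw [h1, Bool.and_false, Bool.or_false]
  exact decide_eq_decide.mpr ⟨by omega, by omega⟩

-- main induction: running A's loop from `check` and B's map+fold from `best` related by `rel`
theorem main_loop (m : String) : ∀ (infos : List String) (i0 : Int)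
    (check : List (Int × String × Int)) (best : Option (Int × String)),
    (∀ info ∈ infos, recOK info = true) →
    (∀ e ∈ check, e.2.2 < i0) →
    rel (PySem.List.sorted2 check (fun x => -x.1) (fun x => x.2.2)) best →
    (match (PySem.List.enumerate infos i0).foldl (solutionStepA m) (some check) with
     | none => ""
     | some check' =>
       match PySem.List.sorted2 check' (fun x => -x.1) (fun x => x.2.2) with
       | [] => "(None)"
       | x :: _ => x.2.1) =
    (match infos.foldl (fun acc info => bestStep acc (entryB (change m) info)) (some best) with
     | none => ""
     | some none => "(None)"
     | some (some b) => b.2) := by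
  intro infos
  induction infos with
  | nil =>
    intro i0 check best hall hidx hrel
    rw [PySem.List.enumerate_nil]
    simp only [List.foldl_nil]
    rcases hs : PySem.List.sorted2 check (fun x => -x.1) (fun x => x.2.2) with _ | ⟨x, s⟩ <;>
      rw [hs] at hrel <;> rcases best with _ | b
    · rfl
    · exact hrel.elim
    · exact hrel.elim
    · exact hrel.2
  | cons info rest ih =>
    intro i0 check best hall hidx hrel
    have hrec : recOK info = true := hall info (by simp)
    have hall' : ∀ r ∈ rest, recOK r = true := fun r hr => hall r (List.mem_cons_of_mem _ hr)
    rw [PySem.List.enumerate_cons]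
    simp only [List.foldl_cons]
    rw [stepA_eq m info i0 check hrec, stepB_eq m info best hrec]
    by_cases hm : matchesOf m info = true
    · cases best with
      | none =>
        have hs : PySem.List.sorted2 check (fun x => -x.1) (fun x => x.2.2) = [] := by
          rcases hs0 : PySem.List.sorted2 check (fun x => -x.1) (fun x => x.2.2) with _ | ⟨y, ys⟩
          · rfl
          · rw [hs0] at hrel; exact hrel.elim
        rw [if_pos hm,
          if_pos (show (matchesOf m info && beats none (playOf info)) = true by
            simp [beats, hm])]
        apply ih (i0 + 1) _ _ hall'
        · intro e he
          rcases List.mem_append.mp he with hmem | hmem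
          · have := hidx e hmem; omega
          · rw [List.mem_singleton.mp hmem]
            exact lt_add_one i0
        · rw [sorted2_snoc, hs, insertBy_nil]
          exact ⟨rfl, rfl⟩
      | some b =>
        rcases hs : PySem.List.sorted2 check (fun x => -x.1) (fun x => x.2.2) with _ | ⟨y, ys⟩
        · rw [hs] at hrel; exact hrel.elim
        · rw [hs] at hrel
          obtain ⟨hy1, hy2⟩ : y.1 = b.1 ∧ y.2.1 = b.2 := hrel
          have hymem : y ∈ check :=
            (PySem.List.sorted2_perm check (fun x => -x.1) (fun x => x.2.2) false).mem_iff.mp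
              (hs ▸ List.mem_cons_self ..)
          have hyi : y.2.2 < i0 := hidx y hymem
          have hlt := cmp_key (playOf info) i0 (nameOf info) y b.1 hyi hy1
          by_cases hb : b.1 < playOf info
          · rw [if_pos hm,
              if_pos (show (matchesOf m info && beats (some b) (playOf info)) = true by
                simp [beats, hm, hb])]
            apply ih (i0 + 1) _ _ hall'
            · intro e he
              rcases List.mem_append.mp he with hmem | hmem
              · have := hidx e hmem; omega
              · rw [List.mem_singleton.mp hmem]
                exact lt_add_one i0
            · rw [sorted2_snoc, hs, insertBy_cons, hlt]
              simp only [hb, decide_true, if_true]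
              exact ⟨rfl, rfl⟩
          · rw [if_pos hm,
              if_neg (show ¬ ((matchesOf m info && beats (some b) (playOf info)) = true) by
                rw [beats_some, decide_eq_false hb, Bool.and_false]
                exact Bool.false_ne_true)]
            apply ih (i0 + 1) _ _ hall'
            · intro e he
              rcases List.mem_append.mp he with hmem | hmem
              · have := hidx e hmem; omega
              · rw [List.mem_singleton.mp hmem]
                exact lt_add_one i0
            · rw [sorted2_snoc, hs, insertBy_cons, hlt]
              simp only [hb, decide_false, Bool.false_eq_true, if_false]
              exact ⟨hy1, hy2⟩
    · have hm0 : matchesOf m info = false := by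
        cases hmb : matchesOf m info
        · rfl
        · exact absurd hmb hm
      rw [if_neg hm, List.append_nil,
        if_neg (show ¬ ((matchesOf m info && beats best (playOf info)) = true) by
          rw [hm0, Bool.false_and]
          exact Bool.false_ne_true)]
      exact ih (i0 + 1) check best hall' (fun e he => by have := hidx e he; omega) hrel

-- ===== VERDICT (by name: the statement is the Claim_ definition above) =====
theorem solution_spec : Claim_equal_solution := by
  intro m musicinfos _hdom hpre
  unfold Spec_solution
  simp only [solution, solution_alt, List.foldl_map]
  exact main_loop m musicinfos 0 [] none hpre (by simp) trivial
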